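-- pv_equiv track=rewrite | github.com/j-clulow/advent-of-code | 2023/day_five.py | source_to_dest
-- ===== SOURCE A (Python) =====
-- def get_map(map_definition,source_values):
-- 	map_links = dict()
-- 	map_dest = int(map_definition[0])
-- 	map_source = int(map_definition[1])
-- 	length = int(map_definition[2])
-- 	max_source = map_source+length
-- 	for source in source_values:
-- 		if int(source) >= int(map_source) and int(source) <= int(max_source):
-- 			map_links[int(source)] = int(map_dest)+(int(source)-int(map_source))
-- 	return map_links
--
-- def source_to_dest(map_definitions,source_entries):
-- 	source_destination_links = dict()
-- 	entries = list(source_entries)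
-- 	for definition in map_definitions:
-- 		links = get_map(definition, entries)
-- 		for entry in list(entries):
-- 			if links.get(int(entry)) != None:
-- 				source_destination_links[int(entry)] = links[int(entry)]
-- 				entries.remove(int(entry))
-- 	for entry in entries:
-- 		source_destination_links[int(entry)] = int(entry)
-- 	return source_destination_links
-- ===== SOURCE B (Python) =====
-- def source_to_dest(map_definitions, source_entries):
--     result = {}
--     remaining = [int(e) for e in source_entries]
--     for definition in map_definitions:
--         dst, src, length = int(definition[0]), int(definition[1]), int(definition[2])
--         unmatched = []
--         for e in remaining:
--             if src <= e <= src + length: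
--                 result[e] = dst + (e - src)
--             else:
--                 unmatched.append(e)
--         remaining = unmatched
--     for e in remaining:
--         result[e] = e
--     return result
-- ===== Notes on version B (the rewrite author's own statement) =====
-- stated objective: faster
-- what changed: A builds a per-definition range dict (get_map) and then walks a copy of the work list calling entries.remove (O(n) each) for every matched entry; B keeps a single result dict and partitions the remaining entries in one pass per definition, with no intermediate dict and no list.remove. Pre_ excludes map definitions with fewer than 3 numbers, on which A raises IndexError.
import Mathlib
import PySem

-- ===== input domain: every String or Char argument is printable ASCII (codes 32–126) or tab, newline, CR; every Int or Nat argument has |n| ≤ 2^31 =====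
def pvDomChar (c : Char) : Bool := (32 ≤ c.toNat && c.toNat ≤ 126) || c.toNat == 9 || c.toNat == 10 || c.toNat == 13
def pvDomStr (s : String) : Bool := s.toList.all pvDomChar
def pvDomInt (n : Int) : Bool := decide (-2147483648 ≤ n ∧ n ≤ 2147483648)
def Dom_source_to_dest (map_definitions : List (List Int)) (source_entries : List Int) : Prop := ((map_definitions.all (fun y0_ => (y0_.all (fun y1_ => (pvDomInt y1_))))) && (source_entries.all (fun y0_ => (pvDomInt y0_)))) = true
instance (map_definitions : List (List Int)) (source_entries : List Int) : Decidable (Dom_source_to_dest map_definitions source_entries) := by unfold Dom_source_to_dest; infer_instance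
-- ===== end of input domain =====

-- B replaces A's per-definition range dict (get_map) plus copy-and-remove work-list handling
-- by one partition pass per definition into a single result dict (objective: simpler).

-- ===== PORT A =====
-- get_map: dict of source -> dest for entries inside the (inclusive) range of one definition
def pvGetMap (map_definition : List Int) (source_values : List Int) : PySem.Dict Int Int :=
  let map_dest := (PySem.List.pyGet? map_definition 0).getD 0
  let map_source := (PySem.List.pyGet? map_definition 1).getD 0
  let length := (PySem.List.pyGet? map_definition 2).getD 0
  let max_source := map_source + length
  source_values.foldl
    (fun links source =>
      if map_source ≤ source ∧ source ≤ max_source then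
        links.insert source (map_dest + (source - map_source))
      else links)
    PySem.Dict.empty

def source_to_dest (map_definitions : List (List Int)) (source_entries : List Int) : List (Int × Int) :=
  let init : PySem.Dict Int Int × List Int := (PySem.Dict.empty, source_entries)
  let st := map_definitions.foldl
    (fun st definition =>
      let links := pvGetMap definition st.2
      -- for entry in list(entries): iterate over a fixed copy while removing from entries
      st.2.foldl
        (fun st2 entry =>
          match links.get? entry with
          | some v => (st2.1.insert entry v, (PySem.List.remove? st2.2 entry).getD st2.2)
          | none => st2)
        st)
    init
  (st.2.foldl (fun d entry => d.insert entry entry) st.1).items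

-- ===== PORT B =====
-- the (dest, source, length) triple of one definition
def pvTr (d : List Int) : Int × Int × Int :=
  ((PySem.List.pyGet? d 0).getD 0, (PySem.List.pyGet? d 1).getD 0, (PySem.List.pyGet? d 2).getD 0)

def source_to_dest_alt (map_definitions : List (List Int)) (source_entries : List Int) : List (Int × Int) :=
  let st := map_definitions.foldl
    (fun st definition =>
      let t := pvTr definition
      st.2.foldl
        (fun st2 e =>
          if t.2.1 ≤ e ∧ e ≤ t.2.1 + t.2.2 then
            (st2.1.insert e (t.1 + (e - t.2.1)), st2.2)
          else (st2.1, st2.2 ++ [e]))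
        (st.1, []))
    ((PySem.Dict.empty : PySem.Dict Int Int), source_entries)
  (st.2.foldl (fun d e => d.insert e e) st.1).items

-- ===== PRECONDITION & SPEC =====
-- Pre_ excludes map definitions with fewer than 3 numbers, on which the Python A raises IndexError.
def Pre_source_to_dest (map_definitions : List (List Int)) (source_entries : List Int) : Prop :=
  ∀ d ∈ map_definitions, 3 ≤ d.length
instance (map_definitions : List (List Int)) (source_entries : List Int) : Decidable (Pre_source_to_dest map_definitions source_entries) := by unfold Pre_source_to_dest; infer_instance

def pvWitness_source_to_dest : List (List Int) × List Int := ([[5, 2, 3]], [1, 2, 3, 9])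

def Spec_source_to_dest (map_definitions : List (List Int)) (source_entries : List Int) (out : List (Int × Int)) : Prop := out = source_to_dest_alt map_definitions source_entries
instance (map_definitions : List (List Int)) (source_entries : List Int) (out : List (Int × Int)) : Decidable (Spec_source_to_dest map_definitions source_entries out) := by unfold Spec_source_to_dest; infer_instance

-- ===== CLAIM (what is proved, stated in full; the proofs are below) =====
def Claim_equal_source_to_dest : Prop := ∀ (map_definitions : List (List Int)) (source_entries : List Int), Dom_source_to_dest map_definitions source_entries → Pre_source_to_dest map_definitions source_entries → Spec_source_to_dest map_definitions source_entries (source_to_dest map_definitions source_entries)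

-- ===== LEMMAS AND PROOFS =====

-- e is inside (inclusive) range of definition d
def pvInR (d : Int × Int × Int) (e : Int) : Bool := decide (d.2.1 ≤ e ∧ e ≤ d.2.1 + d.2.2)

def pvVal (d : Int × Int × Int) (e : Int) : Int := d.1 + (e - d.2.1)

-- the common insertion stream: entries matched by def 0 (paired with their mapped value),
-- then among the rest those matched by def 1, …, finally the unmatched mapped to themselves
def pvG : List (Int × Int × Int) → List Int → List (Int × Int)
  | [], es => es.map (fun e => (e, e))
  | d :: ds, es =>
      (es.filter (fun e => pvInR d e)).map (fun e => (e, pvVal d e))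
        ++ pvG ds (es.filter (fun e => !pvInR d e))

lemma pv_get?_foldl_insert_guard (p : Int → Prop) [DecidablePred p] (f : Int → Int) :
    ∀ (l : List Int) (d : PySem.Dict Int Int) (e : Int),
    (l.foldl (fun links s => if p s then links.insert s (f s) else links) d).get? e
      = if p e ∧ e ∈ l then some (f e) else d.get? e := by
  intro l
  induction l with
  | nil => intro d e; simp
  | cons s t ih =>
    intro d e
    rw [List.foldl_cons]
    by_cases hs : p s
    · rw [if_pos hs, ih, PySem.Dict.get?_insert]
      by_cases h1 : e ∈ t <;> by_cases h2 : e = s <;> by_cases h3 : p e <;>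
        simp_all
    · rw [if_neg hs, ih]
      by_cases h1 : e ∈ t <;> by_cases h2 : e = s <;> by_cases h3 : p e <;>
        simp_all

lemma pv_getMap_get? (md : List Int) (svs : List Int) (e : Int) :
    (pvGetMap md svs).get? e =
      if pvInR (pvTr md) e ∧ e ∈ svs then some (pvVal (pvTr md) e) else none := by
  unfold pvGetMap
  simp only []
  rw [pv_get?_foldl_insert_guard
        (fun source => (PySem.List.pyGet? md 1).getD 0 ≤ source ∧
          source ≤ (PySem.List.pyGet? md 1).getD 0 + (PySem.List.pyGet? md 2).getD 0)
        (fun source => (PySem.List.pyGet? md 0).getD 0 + (source - (PySem.List.pyGet? md 1).getD 0))]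
  simp only [PySem.Dict.get?_empty, pvInR, pvTr, pvVal]
  by_cases h1 : e ∈ svs <;>
    by_cases h2 : (PySem.List.pyGet? md 1).getD 0 ≤ e ∧
      e ≤ (PySem.List.pyGet? md 1).getD 0 + (PySem.List.pyGet? md 2).getD 0 <;>
    simp [h1, h2]

lemma pv_remove?_append (v : Int) :
    ∀ (pre l : List Int), v ∉ pre →
    PySem.List.remove? (pre ++ l) v = (PySem.List.remove? l v).map (fun t => pre ++ t) := by
  intro pre
  induction pre with
  | nil => intro l _; simp [Option.map_id']
  | cons x t ih =>
    intro l hv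
    simp only [List.mem_cons, not_or] at hv
    rw [List.cons_append, PySem.List.remove?_cons_of_ne _ (fun h => hv.1 h.symm), ih l hv.2,
      Option.map_map]
    rfl

lemma pv_pass (links : PySem.Dict Int Int) (td : Int × Int × Int) :
    ∀ (copy pre : List Int) (sdl : PySem.Dict Int Int),
    (∀ e ∈ copy, links.get? e = if pvInR td e then some (pvVal td e) else none) →
    (∀ x ∈ pre, pvInR td x = false) →
    copy.foldl
      (fun st2 entry =>
        match links.get? entry with
        | some v => (st2.1.insert entry v, (PySem.List.remove? st2.2 entry).getD st2.2)
        | none => st2)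
      (sdl, pre ++ copy)
    = (((copy.filter (fun e => pvInR td e)).map (fun e => (e, pvVal td e))).foldl
         (fun d p => d.insert p.1 p.2) sdl,
       pre ++ copy.filter (fun e => !pvInR td e)) := by
  intro copy
  induction copy with
  | nil => intro pre sdl _ _; simp
  | cons c rest ih =>
    intro pre sdl h1 h2
    have hc := h1 c (by simp)
    by_cases hr : pvInR td c
    · have hcpre : c ∉ pre := fun hmem => by simp [h2 c hmem] at hr
      rw [List.foldl_cons]
      simp only [hc, hr, if_true]
      have hrm : (PySem.List.remove? (pre ++ c :: rest) c).getD (pre ++ c :: rest) = pre ++ rest := by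
        rw [pv_remove?_append c pre (c :: rest) hcpre, PySem.List.remove?_cons_self]
        rfl
      rw [hrm, ih pre _ (fun e he => h1 e (by simp [he])) h2]
      simp [hr]
    · rw [List.foldl_cons, hc, if_neg hr]
      have hst : pre ++ c :: rest = (pre ++ [c]) ++ rest := by simp
      rw [hst, ih (pre ++ [c]) sdl (fun e he => h1 e (by simp [he]))
        (by intro x hx; rcases List.mem_append.mp hx with h | h
            · exact h2 x h
            · simp only [List.mem_singleton] at h; subst h; simpa using hr)]
      simp [hr]

lemma pv_outer :
    ∀ (mds : List (List Int)) (entries : List Int) (sdl : PySem.Dict Int Int),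
    (let st := mds.foldl
        (fun st definition =>
          let links := pvGetMap definition st.2
          st.2.foldl
            (fun st2 entry =>
              match links.get? entry with
              | some v => (st2.1.insert entry v, (PySem.List.remove? st2.2 entry).getD st2.2)
              | none => st2)
            st)
        (sdl, entries);
     st.2.foldl (fun d entry => d.insert entry entry) st.1)
    = (pvG (mds.map pvTr) entries).foldl (fun d p => d.insert p.1 p.2) sdl := by
  intro mds
  induction mds with
  | nil =>
    intro entries sdl
    simp only [List.foldl_nil, List.map_nil, pvG]
    rw [List.foldl_map]
  | cons md rest ih =>
    intro entries sdl
    simp only [List.foldl_cons]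
    have hpass := pv_pass (pvGetMap md entries) (pvTr md) entries [] sdl
      (fun e he => by rw [pv_getMap_get? md entries e]; by_cases h : pvInR (pvTr md) e <;> simp [h, he])
      (by intro x hx; simp at hx)
    simp only [List.nil_append] at hpass
    rw [hpass]
    rw [ih]
    simp only [List.map_cons, pvG, List.foldl_append]

-- B-side: one partition pass equals (insert the matched pairs, keep the unmatched)
lemma pv_partition_pass (t : Int × Int × Int) :
    ∀ (l : List Int) (d : PySem.Dict Int Int) (acc : List Int),
    l.foldl
      (fun st2 e =>
        if t.2.1 ≤ e ∧ e ≤ t.2.1 + t.2.2 then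
          (st2.1.insert e (t.1 + (e - t.2.1)), st2.2)
        else (st2.1, st2.2 ++ [e]))
      (d, acc)
    = (((l.filter (fun e => pvInR t e)).map (fun e => (e, pvVal t e))).foldl
         (fun d p => d.insert p.1 p.2) d,
       acc ++ l.filter (fun e => !pvInR t e)) := by
  intro l
  induction l with
  | nil => intro d acc; simp
  | cons c rest ih =>
    intro d acc
    rw [List.foldl_cons]
    by_cases h : t.2.1 ≤ c ∧ c ≤ t.2.1 + t.2.2
    · have hr : pvInR t c = true := by simp [pvInR, h]
      rw [if_pos h, ih]
      simp [hr, pvVal]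
    · have hr : pvInR t c = false := by simp [pvInR, h]
      rw [if_neg h, ih]
      simp [hr]

lemma pv_B_outer :
    ∀ (mds : List (List Int)) (entries : List Int) (sdl : PySem.Dict Int Int),
    (let st := mds.foldl
        (fun st definition =>
          let t := pvTr definition
          st.2.foldl
            (fun st2 e =>
              if t.2.1 ≤ e ∧ e ≤ t.2.1 + t.2.2 then
                (st2.1.insert e (t.1 + (e - t.2.1)), st2.2)
              else (st2.1, st2.2 ++ [e]))
            (st.1, []))
        (sdl, entries);
     st.2.foldl (fun d e => d.insert e e) st.1)
    = (pvG (mds.map pvTr) entries).foldl (fun d p => d.insert p.1 p.2) sdl := by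
  intro mds
  induction mds with
  | nil =>
    intro entries sdl
    simp only [List.foldl_nil, List.map_nil, pvG]
    rw [List.foldl_map]
  | cons md rest ih =>
    intro entries sdl
    simp only [List.foldl_cons]
    rw [pv_partition_pass (pvTr md) entries sdl []]
    simp only [List.nil_append]
    rw [ih]
    simp only [List.map_cons, pvG, List.foldl_append]

-- A as a fold of the common stream
lemma pv_A_eq (md : List (List Int)) (se : List Int) :
    source_to_dest md se
    = ((pvG (md.map pvTr) se).foldl (fun d p => d.insert p.1 p.2) PySem.Dict.empty).items := by
  unfold source_to_dest
  dsimp only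
  rw [pv_outer md se PySem.Dict.empty]

-- B as a fold of the common stream
lemma pv_B_eq (md : List (List Int)) (se : List Int) :
    source_to_dest_alt md se
    = ((pvG (md.map pvTr) se).foldl (fun d p => d.insert p.1 p.2) PySem.Dict.empty).items := by
  unfold source_to_dest_alt
  dsimp only
  rw [pv_B_outer md se PySem.Dict.empty]

-- ===== VERDICT (by name: the statement is the Claim_ definition above) =====
theorem source_to_dest_spec : Claim_equal_source_to_dest := by
  intro md se _ _
  unfold Spec_source_to_dest
  rw [pv_A_eq, pv_B_eq]
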